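-- pv_equiv track=rewrite | github.com/hiyongz/AlgorithmNotes | 04-Tree-Graph/get_metro_num.py | get_metro_num_to_dest
-- ===== SOURCE A (Python) =====
-- from collections import defaultdict
--
-- def get_metro_num_to_dest(lines, src, dest):
--     # 如果起点和终点相同则不需要坐地铁
--     if src == dest:
--         return 0
--     # 建图
--     graph = defaultdict(list) # 使用字典保存图
--
--     # 以车站作为节点，每个车站对应能经过它的地铁
--     for lines_number, stations in enumerate(lines):
--         for station in stations:
--             graph[station].append(lines_number)
--
--     # 进行广度优先搜索
--     queue = [(src, 0)] # 新建一个队列（起点，记录经过的地铁线）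
--     visited_stations = [] # 已经经过的车站
--     visited_lines = [] # 已经经过的铁路线
--
--     while queue:
--         station, count = queue.pop(0) # 节点出队
--         if station == dest:
--             return count
--         # 遍历经过当前车站的铁路线
--         for lines_number in graph[station]:
--             if lines_number not in visited_lines:
--                 visited_lines.append(lines_number)
--                 # 访问当前铁路线的所有车站，如果没有访问，标记为已访问并入队
--                 for station in lines[lines_number]:
--                     if station not in visited_stations:
--                         visited_stations.append(station)
--                         queue.append((station, count + 1))
--     return -1
-- ===== SOURCE B (Python) =====
-- def get_metro_num_to_dest(lines, src, dest):
--     # Level-synchronous BFS over metro LINES (not stations): frontier = lines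
--     # reachable with `count` boardings; expand by shared stations until a
--     # frontier line contains dest.
--     if src == dest:
--         return 0
--     frontier = [i for i, sts in enumerate(lines) if src in sts]
--     visited = list(frontier)
--     count = 1
--     while frontier:
--         if any(dest in lines[i] for i in frontier):
--             return count
--         frontier = [j for j, sts in enumerate(lines)
--                     if j not in visited
--                     and any(s in sts for i in frontier for s in lines[i])]
--         visited.extend(frontier)
--         count += 1
--     return -1
-- ===== Notes on version B (the rewrite author's own statement) =====
-- stated objective: simpler
-- what changed: A's station-by-station queue BFS with a defaultdict station->lines graph is replaced by a shorter level-synchronous BFS over line indices: a frontier of lines is expanded each round via shared stations until a frontier line contains dest; no per-station graph dict, queue or visited-station list is built, which also removes A's linear 'station not in visited_stations' scans.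
import Mathlib
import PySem

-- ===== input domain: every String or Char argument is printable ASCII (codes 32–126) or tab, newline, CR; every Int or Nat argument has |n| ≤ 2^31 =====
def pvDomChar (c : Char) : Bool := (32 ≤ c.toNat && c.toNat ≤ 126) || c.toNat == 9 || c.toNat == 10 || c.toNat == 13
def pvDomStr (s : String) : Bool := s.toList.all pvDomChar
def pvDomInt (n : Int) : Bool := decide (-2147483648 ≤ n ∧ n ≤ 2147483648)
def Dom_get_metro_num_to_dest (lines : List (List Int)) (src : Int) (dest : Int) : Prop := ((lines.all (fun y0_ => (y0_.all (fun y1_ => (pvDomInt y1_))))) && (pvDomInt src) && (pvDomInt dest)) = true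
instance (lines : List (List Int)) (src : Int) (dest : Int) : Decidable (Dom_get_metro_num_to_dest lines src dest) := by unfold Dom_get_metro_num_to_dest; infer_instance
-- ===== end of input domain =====

-- B replaces A's station-by-station queue BFS by a level-synchronous BFS over
-- metro LINES (frontier of line indices expanded by shared stations); objective:
-- simpler (shorter, no graph dict, no per-station queue). Return value only.

-- ===== PORT A =====

-- lines[i] for an index A only ever produces in range (the getD [] is a totalizing guard)
def pvGetLine (lines : List (List Int)) (i : Int) : List Int :=
  PySem.List.pyGetD lines i []

-- graph = defaultdict(list); for lines_number, stations in enumerate(lines): for station in stations: graph[station].append(lines_number)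
def pvBuildGraph (lines : List (List Int)) : PySem.Dict Int (List Int) :=
  (PySem.List.enumerate lines).foldl
    (fun g p => p.2.foldl (fun g st => g.modify st [] (· ++ [p.1])) g)
    PySem.Dict.empty

-- body of "for lines_number in graph[station]" for one lines_number
def pvStepLine (lines : List (List Int)) (count : Int)
    (acc : List (Int × Int) × List Int × List Int) (ln : Int) :
    List (Int × Int) × List Int × List Int :=
  let (q, vs, vl) := acc
  if ln ∈ vl then (q, vs, vl)
  else
    let vl := vl ++ [ln]
    let r := (pvGetLine lines ln).foldl
      (fun (a : List (Int × Int) × List Int) st =>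
        if st ∈ a.2 then a else (a.1 ++ [(st, count + 1)], a.2 ++ [st]))
      (q, vs)
    (r.1, r.2, vl)

-- while queue: … (fuel = an upper bound on the number of iterations, see the proofs)
def pvLoopA (lines : List (List Int)) (dest : Int) (graph : PySem.Dict Int (List Int)) :
    Nat → List (Int × Int) → List Int → List Int → Int
  | _, [], _, _ => -1
  | 0, _ :: _, _, _ => -1
  | f + 1, (station, count) :: qs, vs, vl =>
    if station = dest then count
    else
      let r := (graph.getD station []).foldl (pvStepLine lines count) (qs, vs, vl)
      pvLoopA lines dest graph f r.1 r.2.1 r.2.2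

def get_metro_num_to_dest (lines : List (List Int)) (src : Int) (dest : Int) : Int :=
  if src = dest then 0
  else
    pvLoopA lines dest (pvBuildGraph lines)
      (2 + (lines.map List.length).sum) [(src, 0)] [] []

-- ===== PORT B =====

-- [i for i, sts in enumerate(lines) if x in sts]
def pvLinesWithStation (lines : List (List Int)) (x : Int) : List Int :=
  ((PySem.List.enumerate lines).filter (fun p => decide (x ∈ p.2))).map (fun p => p.1)

-- [j for j, sts in enumerate(lines) if j not in visited and any(s in sts for i in frontier for s in lines[i])]
def pvNewFrontier (lines : List (List Int)) (frontier visited : List Int) : List Int :=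
  ((PySem.List.enumerate lines).filter (fun p =>
      decide (p.1 ∉ visited) &&
      frontier.any (fun i => (pvGetLine lines i).any (fun s => decide (s ∈ p.2))))).map
    (fun p => p.1)

-- while frontier: …  (fuel bounds the number of rounds, see the proofs)
def pvLoopB (lines : List (List Int)) (dest : Int) :
    Nat → List Int → List Int → Int → Int
  | 0, _, _, _ => -1
  | f + 1, frontier, visited, count =>
    if frontier = [] then -1
    else if frontier.any (fun i => decide (dest ∈ pvGetLine lines i)) then count
    else
      let nf := pvNewFrontier lines frontier visited
      pvLoopB lines dest f nf (visited ++ nf) (count + 1)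

def get_metro_num_to_dest_alt (lines : List (List Int)) (src : Int) (dest : Int) : Int :=
  if src = dest then 0
  else
    let f0 := pvLinesWithStation lines src
    pvLoopB lines dest (lines.length + 2) f0 f0 1

-- ===== PRECONDITION & SPEC =====
def Spec_get_metro_num_to_dest (lines : List (List Int)) (src : Int) (dest : Int) (out : Int) : Prop := out = get_metro_num_to_dest_alt lines src dest
instance (lines : List (List Int)) (src : Int) (dest : Int) (out : Int) : Decidable (Spec_get_metro_num_to_dest lines src dest out) := by unfold Spec_get_metro_num_to_dest; infer_instance

-- ===== CLAIM (what is proved, stated in full; the proofs are below) =====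
def Claim_equal_get_metro_num_to_dest : Prop := ∀ (lines : List (List Int)) (src : Int) (dest : Int), Dom_get_metro_num_to_dest lines src dest → Spec_get_metro_num_to_dest lines src dest (get_metro_num_to_dest lines src dest)


-- ===== LEMMAS AND PROOFS =====

-- j indexes a line of `lines` that contains station s
def pvThru (lines : List (List Int)) (s j : Int) : Prop :=
  0 ≤ j ∧ j.toNat < lines.length ∧ s ∈ pvGetLine lines j

-- x is a station of some line listed in vl
def pvStS (lines : List (List Int)) (vl : List Int) (x : Int) : Prop :=
  ∃ j ∈ vl, x ∈ pvGetLine lines j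

-- stations not yet marked visited (A-side fuel measure)
def pvCapS (lines : List (List Int)) (vs : List Int) : Nat :=
  (lines.flatten.toFinset.filter (fun x => x ∉ vs)).card

-- line indices not yet visited (B-side fuel measure)
def pvCapL (lines : List (List Int)) (visited : List Int) : Nat :=
  ((Finset.range lines.length).filter (fun (i : Nat) => ((i : Int) ∉ visited))).card

theorem pvGetLine_eq (lines : List (List Int)) (k : Nat) (h : k < lines.length) :
    pvGetLine lines (k : Int) = lines[k] := by
  unfold pvGetLine
  rw [PySem.List.pyGetD_natCast]
  simp [List.getD_eq_getElem?_getD, h]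

theorem pvThru_iff (lines : List (List Int)) (s j : Int) :
    pvThru lines s j ↔ ∃ (k : Nat) (h : k < lines.length), j = (k : Int) ∧ s ∈ lines[k] := by
  constructor
  · rintro ⟨h0, h1, h2⟩
    refine ⟨j.toNat, h1, by omega, ?_⟩
    rwa [← pvGetLine_eq lines j.toNat h1, Int.toNat_of_nonneg h0]
  · rintro ⟨k, h, rfl, hs⟩
    exact ⟨by omega, by simpa using h, by rwa [pvGetLine_eq lines k h]⟩

theorem innerFold_getD (sts : List Int) (i : Int) (g : PySem.Dict Int (List Int)) (s : Int) :
    (sts.foldl (fun g st => g.modify st [] (· ++ [i])) g).getD s []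
      = g.getD s [] ++ (sts.filter (fun st => st == s)).map (fun _ => i) := by
  have h1 : sts.foldl (fun g st => g.modify st [] (· ++ [i])) g
      = (sts.map (fun st => (st, i))).foldl (fun d p => d.modify p.1 [] (· ++ [p.2])) g := by
    rw [List.foldl_map]
  rw [h1, PySem.Dict.getD_foldl_modify_append]
  congr 1
  rw [List.filter_map]
  simp [Function.comp_def, List.map_map]

theorem outer_getD (lines : List (List Int)) : ∀ (a : Int) (g : PySem.Dict Int (List Int)) (s j : Int),
    j ∈ ((PySem.List.enumerate lines a).foldl
        (fun g p => p.2.foldl (fun g st => g.modify st [] (· ++ [p.1])) g) g).getD s []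
      ↔ j ∈ g.getD s [] ∨ ∃ (k : Nat) (h : k < lines.length), j = a + (k : Int) ∧ s ∈ lines[k] := by
  induction lines with
  | nil => intro a g s j; simp [PySem.List.enumerate_nil]
  | cons l ls ih =>
    intro a g s j
    rw [PySem.List.enumerate_cons]
    simp only [List.foldl_cons]
    rw [ih (a+1)]
    rw [innerFold_getD]
    constructor
    · rintro (h | ⟨k, hk, rfl, hs⟩)
      · rw [List.mem_append] at h
        rcases h with h | h
        · exact Or.inl h
        · simp only [List.mem_map, List.mem_filter] at h
          obtain ⟨st, ⟨hst, he⟩, rfl⟩ := h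
          refine Or.inr ⟨0, by simp, by simp, ?_⟩
          simp only [beq_iff_eq] at he; subst he; simpa using hst
      · exact Or.inr ⟨k+1, by simpa using hk, by push_cast; ring, by simpa using hs⟩
    · rintro (h | ⟨k, hk, rfl, hs⟩)
      · exact Or.inl (by simp [h])
      · cases k with
        | zero =>
          refine Or.inl ?_
          rw [List.mem_append]
          refine Or.inr ?_
          simp only [List.mem_map, List.mem_filter]
          exact ⟨s, ⟨by simpa using hs, by simp⟩, by simp⟩
        | succ k =>
          refine Or.inr ⟨k, by simpa using hk, by push_cast; ring, by simpa using hs⟩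

theorem mem_buildGraph (lines : List (List Int)) (s j : Int) :
    j ∈ (pvBuildGraph lines).getD s [] ↔ pvThru lines s j := by
  rw [pvBuildGraph, outer_getD, pvThru_iff]
  simp [PySem.Dict.getD_empty]

theorem mem_linesWithStation (lines : List (List Int)) (x j : Int) :
    j ∈ pvLinesWithStation lines x ↔ pvThru lines x j := by
  rw [pvLinesWithStation, pvThru_iff]
  simp only [List.mem_map, List.mem_filter, PySem.List.mem_enumerate_iff]
  constructor
  · rintro ⟨p, ⟨⟨k, hk, rfl⟩, hx⟩, rfl⟩
    exact ⟨k, hk, by simp, by simpa using hx⟩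
  · rintro ⟨k, hk, rfl, hx⟩
    exact ⟨((k : Int), lines[k]), ⟨⟨k, hk, by simp⟩, by simpa using hx⟩, rfl⟩

theorem mem_newFrontier (lines : List (List Int)) (frontier visited : List Int) (j : Int) :
    j ∈ pvNewFrontier lines frontier visited ↔
      (0 ≤ j ∧ j.toNat < lines.length ∧ j ∉ visited ∧
        ∃ m ∈ frontier, ∃ s ∈ pvGetLine lines m, s ∈ pvGetLine lines j) := by
  rw [pvNewFrontier]
  simp only [List.mem_map, List.mem_filter, PySem.List.mem_enumerate_iff, Bool.and_eq_true,
    decide_eq_true_eq, List.any_eq_true]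
  constructor
  · rintro ⟨p, ⟨⟨k, hk, rfl⟩, hnv, m, hm, s, hs, hsp⟩, rfl⟩
    refine ⟨by simp, by simpa using hk, by simpa using hnv, m, hm, s, hs, ?_⟩
    simpa [pvGetLine_eq lines k (by simpa using hk)] using hsp
  · rintro ⟨h0, h1, hnv, m, hm, s, hs, hsj⟩
    refine ⟨((j.toNat : Int), lines[j.toNat]), ⟨⟨j.toNat, h1, by simp [Int.toNat_of_nonneg h0]⟩,
      by simpa [Int.toNat_of_nonneg h0] using hnv, m, hm, s, hs, ?_⟩, by simp [Int.toNat_of_nonneg h0]⟩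
    rw [← pvGetLine_eq lines j.toNat h1, Int.toNat_of_nonneg h0]
    simpa using hsj

theorem stFold_char (c : Int) (sts : List Int) : ∀ (q : List (Int × Int)) (vs : List Int),
    ∃ d : List Int,
      sts.foldl (fun (a : List (Int × Int) × List Int) st =>
          if st ∈ a.2 then a else (a.1 ++ [(st, c + 1)], a.2 ++ [st])) (q, vs)
        = (q ++ d.map (fun st => (st, c + 1)), vs ++ d)
      ∧ d.Nodup ∧ (∀ x ∈ d, x ∉ vs ∧ x ∈ sts) ∧ (∀ x ∈ sts, x ∈ vs ∨ x ∈ d) := by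
  induction sts with
  | nil => intro q vs; exact ⟨[], by simp, by simp, by simp, by simp⟩
  | cons st sts ih =>
    intro q vs
    by_cases h : st ∈ vs
    · obtain ⟨d, he, hnd, hm, hc⟩ := ih q vs
      refine ⟨d, ?_, hnd, ?_, ?_⟩
      · simpa [h] using he
      · exact fun x hx => ⟨(hm x hx).1, List.mem_cons_of_mem _ (hm x hx).2⟩
      · intro x hx
        rcases List.mem_cons.1 hx with rfl | hx
        · exact Or.inl h
        · exact hc x hx
    · obtain ⟨d, he, hnd, hm, hc⟩ := ih (q ++ [(st, c + 1)]) (vs ++ [st])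
      refine ⟨st :: d, ?_, ?_, ?_, ?_⟩
      · simpa [h, List.append_assoc] using he
      · refine List.Nodup.cons (fun hst => ?_) hnd
        have := (hm st hst).1; simp at this
      · intro x hx
        rcases List.mem_cons.1 hx with rfl | hx
        · exact ⟨h, List.mem_cons_self⟩
        · have := hm x hx
          constructor
          · intro hxv; exact this.1 (by simp [hxv])
          · exact List.mem_cons_of_mem _ this.2
      · intro x hx
        rcases List.mem_cons.1 hx with rfl | hx
        · exact Or.inr List.mem_cons_self
        · rcases hc x hx with hv | hd
          · rcases List.mem_append.1 hv with hv | hv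
            · exact Or.inl hv
            · simp at hv; subst hv; exact Or.inr List.mem_cons_self
          · exact Or.inr (List.mem_cons_of_mem _ hd)

theorem lnFold_shape (lines : List (List Int)) (c : Int) (ls : List Int) :
    ∀ (q : List (Int × Int)) (vs vl : List Int),
    ∃ (d : List Int) (vl' : List Int),
      ls.foldl (pvStepLine lines c) (q, vs, vl) = (q ++ d.map (fun st => (st, c + 1)), vs ++ d, vl') := by
  induction ls with
  | nil => intro q vs vl; exact ⟨[], vl, by simp⟩
  | cons ln ls ih =>
    intro q vs vl
    by_cases h : ln ∈ vl
    · obtain ⟨d, vl', he⟩ := ih q vs vl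
      exact ⟨d, vl', by simpa [pvStepLine, h] using he⟩
    · obtain ⟨d0, heq, _, _, _⟩ := stFold_char c (pvGetLine lines ln) q vs
      obtain ⟨d1, vl', he⟩ := ih (q ++ d0.map (fun st => (st, c + 1))) (vs ++ d0) (vl ++ [ln])
      refine ⟨d0 ++ d1, vl', ?_⟩
      have hstep : pvStepLine lines c (q, vs, vl) ln
          = (q ++ d0.map (fun st => (st, c + 1)), vs ++ d0, vl ++ [ln]) := by
        simp [pvStepLine, h, heq]
      simp only [List.foldl_cons, hstep, he]
      simp [List.append_assoc]

theorem lnFold_char (lines : List (List Int)) (c : Int) (ls : List Int) :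
    ∀ (q : List (Int × Int)) (vs vl : List Int),
    (∀ x, pvStS lines vl x → x ∈ vs) →
    ∃ (d : List Int) (vl' : List Int),
      ls.foldl (pvStepLine lines c) (q, vs, vl) = (q ++ d.map (fun st => (st, c + 1)), vs ++ d, vl')
      ∧ d.Nodup ∧ (∀ x ∈ d, x ∉ vs)
      ∧ (∀ j, j ∈ vl' ↔ j ∈ vl ∨ j ∈ ls)
      ∧ (∀ x ∈ d, ∃ ℓ ∈ ls, ℓ ∉ vl ∧ x ∈ pvGetLine lines ℓ)
      ∧ (∀ x, pvStS lines vl' x → x ∈ vs ++ d) := by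
  induction ls with
  | nil =>
    intro q vs vl hvs
    exact ⟨[], vl, by simp, by simp, by simp, by simp, by simp,
      fun x hx => by simpa using hvs x hx⟩
  | cons ln ls ih =>
    intro q vs vl hvs
    by_cases h : ln ∈ vl
    · obtain ⟨d, vl', he, hnd, hnv, hiff, horig, hcov⟩ := ih q vs vl hvs
      refine ⟨d, vl', by simpa [pvStepLine, h] using he, hnd, hnv, ?_, ?_, hcov⟩
      · intro j; rw [hiff j]
        constructor
        · rintro (hj | hj)
          · exact Or.inl hj
          · exact Or.inr (List.mem_cons_of_mem _ hj)
        · rintro (hj | hj)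
          · exact Or.inl hj
          · rcases List.mem_cons.1 hj with rfl | hj
            · exact Or.inl h
            · exact Or.inr hj
      · intro x hx
        obtain ⟨ℓ, hl, hlv, hxl⟩ := horig x hx
        exact ⟨ℓ, List.mem_cons_of_mem _ hl, hlv, hxl⟩
    · obtain ⟨d0, heq, hnd0, hm0, hc0⟩ := stFold_char c (pvGetLine lines ln) q vs
      have hvs1 : ∀ x, pvStS lines (vl ++ [ln]) x → x ∈ vs ++ d0 := by
        intro x ⟨j, hj, hxj⟩
        rcases List.mem_append.1 hj with hj | hj
        · exact List.mem_append.2 (Or.inl (hvs x ⟨j, hj, hxj⟩))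
        · simp at hj; subst hj
          rcases hc0 x hxj with hv | hd
          · exact List.mem_append.2 (Or.inl hv)
          · exact List.mem_append.2 (Or.inr hd)
      obtain ⟨d1, vl', he, hnd1, hnv1, hiff, horig, hcov⟩ :=
        ih (q ++ d0.map (fun st => (st, c + 1))) (vs ++ d0) (vl ++ [ln]) hvs1
      have hstep : pvStepLine lines c (q, vs, vl) ln
          = (q ++ d0.map (fun st => (st, c + 1)), vs ++ d0, vl ++ [ln]) := by
        simp [pvStepLine, h, heq]
      refine ⟨d0 ++ d1, vl', ?_, ?_, ?_, ?_, ?_, ?_⟩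
      · simp only [List.foldl_cons, hstep, he]
        simp [List.append_assoc]
      · refine List.Nodup.append hnd0 hnd1 (fun x hx0 hx1 => ?_)
        exact hnv1 x hx1 (List.mem_append.2 (Or.inr hx0))
      · intro x hx
        rcases List.mem_append.1 hx with hx | hx
        · exact (hm0 x hx).1
        · exact fun hv => hnv1 x hx (List.mem_append.2 (Or.inl hv))
      · intro j; rw [hiff j]
        simp only [List.mem_append, List.mem_cons]
        tauto
      · intro x hx
        rcases List.mem_append.1 hx with hx | hx
        · exact ⟨ln, List.mem_cons_self, h, (hm0 x hx).2⟩
        · obtain ⟨ℓ, hl, hlv, hxl⟩ := horig x hx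
          refine ⟨ℓ, List.mem_cons_of_mem _ hl, fun hv => hlv (List.mem_append.2 (Or.inl hv)), hxl⟩
      · intro x hx
        have := hcov x hx
        simpa [List.append_assoc] using this

theorem destRun (lines : List (List Int)) (dest : Int) (graph : PySem.Dict Int (List Int))
    (k : Int) (news : List Int) : ∀ (tail : List (Int × Int)) (vs vl : List Int) (fA : Nat),
    dest ∈ news → news.length < fA →
    pvLoopA lines dest graph fA (news.map (fun s => (s, k)) ++ tail) vs vl = k := by
  induction news with
  | nil => intro _ _ _ _ h; exact absurd h (List.not_mem_nil)
  | cons s rest ih =>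
    intro tail vs vl fA hd hf
    obtain ⟨f, rfl⟩ : ∃ f, fA = f + 1 := ⟨fA - 1, by omega⟩
    by_cases hs : s = dest
    · subst hs; simp [pvLoopA]
    · obtain ⟨d0, vl1, heq⟩ :=
        lnFold_shape lines k (graph.getD s []) (rest.map (fun s => (s, k)) ++ tail) vs vl
      have hd' : dest ∈ rest := by
        rcases List.mem_cons.1 hd with h | h
        · exact absurd h.symm hs
        · exact h
      simp only [pvLoopA, List.map_cons, List.cons_append, hs, if_false, heq]
      have := ih (tail ++ d0.map (fun st => (st, k + 1))) (vs ++ d0) vl1 f hd'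
        (by simp only [List.length_cons] at hf; omega)
      simpa [List.append_assoc] using this

theorem levelStep (lines : List (List Int)) (dest : Int) (graph : PySem.Dict Int (List Int)) (k : Int) (news : List Int) :
    ∀ (e : List Int) (vs vl : List Int) (fA : Nat),
    dest ∉ news →
    (∀ x, pvStS lines vl x → x ∈ vs) →
    news.length < fA →
    ∃ (d : List Int) (vl' : List Int),
      pvLoopA lines dest graph fA
          (news.map (fun s => (s, k)) ++ e.map (fun s => (s, k + 1))) vs vl
        = pvLoopA lines dest graph (fA - news.length)
            ((e ++ d).map (fun s => (s, k + 1))) (vs ++ d) vl'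
      ∧ d.Nodup ∧ (∀ x ∈ d, x ∉ vs)
      ∧ (∀ j, j ∈ vl' ↔ j ∈ vl ∨ ∃ s ∈ news, j ∈ graph.getD s [])
      ∧ (∀ x ∈ d, ∃ j, (j ∉ vl ∧ ∃ s ∈ news, j ∈ graph.getD s []) ∧ x ∈ pvGetLine lines j)
      ∧ (∀ x, pvStS lines vl' x → x ∈ vs ++ d) := by
  induction news with
  | nil =>
    intro e vs vl fA _ hvs _
    exact ⟨[], vl, by simp, by simp, by simp, by simp, by simp,
      fun x hx => by simpa using hvs x hx⟩
  | cons s rest ih =>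
    intro e vs vl fA hd hvs hf
    obtain ⟨f, rfl⟩ : ∃ f, fA = f + 1 := ⟨fA - 1, by omega⟩
    have hs : s ≠ dest := fun h => hd (h ▸ List.mem_cons_self)
    obtain ⟨d0, vl1, heq, hnd0, hnv0, hiff0, horig0, hcov0⟩ :=
      lnFold_char lines k (graph.getD s [])
        (rest.map (fun s => (s, k)) ++ e.map (fun s => (s, k + 1))) vs vl hvs
    obtain ⟨d1, vl', he1, hnd1, hnv1, hiff1, horig1, hcov1⟩ :=
      ih (e ++ d0) (vs ++ d0) vl1 f (fun h => hd (List.mem_cons_of_mem _ h))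
        hcov0 (by simp only [List.length_cons] at hf; omega)
    refine ⟨d0 ++ d1, vl', ?_, ?_, ?_, ?_, ?_, ?_⟩
    · simp only [pvLoopA, List.map_cons, List.cons_append, hs, if_false, heq]
      have hq : (rest.map (fun s => (s, k)) ++ e.map (fun s => (s, k + 1)))
            ++ d0.map (fun st => (st, k + 1))
          = rest.map (fun s => (s, k)) ++ (e ++ d0).map (fun s => (s, k + 1)) := by
        simp [List.append_assoc]
      rw [hq, he1]
      have : f + 1 - (s :: rest).length = f - rest.length := by simp
      rw [this]
      simp [List.append_assoc]
    · refine List.Nodup.append hnd0 hnd1 (fun x hx0 hx1 => ?_)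
      exact hnv1 x hx1 (List.mem_append.2 (Or.inr hx0))
    · intro x hx
      rcases List.mem_append.1 hx with hx | hx
      · exact hnv0 x hx
      · exact fun hv => hnv1 x hx (List.mem_append.2 (Or.inl hv))
    · intro j
      rw [hiff1 j, hiff0 j]
      simp only [List.mem_cons]
      constructor
      · rintro ((hj | hj) | ⟨s', hs', hj⟩)
        · exact Or.inl hj
        · exact Or.inr ⟨s, Or.inl rfl, hj⟩
        · exact Or.inr ⟨s', Or.inr hs', hj⟩
      · rintro (hj | ⟨s', (rfl | hs'), hj⟩)
        · exact Or.inl (Or.inl hj)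
        · exact Or.inl (Or.inr hj)
        · exact Or.inr ⟨s', hs', hj⟩
    · intro x hx
      rcases List.mem_append.1 hx with hx | hx
      · obtain ⟨ℓ, hl, hlv, hxl⟩ := horig0 x hx
        exact ⟨ℓ, ⟨hlv, s, List.mem_cons_self, hl⟩, hxl⟩
      · obtain ⟨j, ⟨hjv, s', hs', hj⟩, hxj⟩ := horig1 x hx
        refine ⟨j, ⟨fun hv => hjv ((hiff0 j).2 (Or.inl hv)),
          s', List.mem_cons_of_mem _ hs', hj⟩, hxj⟩
    · intro x hx
      simpa [List.append_assoc] using hcov1 x hx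

theorem capS_append (lines : List (List Int)) (vs d : List Int) (hN : d.Nodup)
    (hnv : ∀ x ∈ d, x ∉ vs) (hfl : ∀ x ∈ d, x ∈ lines.flatten) :
    pvCapS lines (vs ++ d) + d.length = pvCapS lines vs := by
  unfold pvCapS
  have hsub : d.toFinset ⊆ lines.flatten.toFinset.filter (fun x => x ∉ vs) := by
    intro x hx
    rw [List.mem_toFinset] at hx
    exact Finset.mem_filter.2 ⟨List.mem_toFinset.2 (hfl x hx), hnv x hx⟩
  have hset : lines.flatten.toFinset.filter (fun x => x ∉ vs ++ d)
      = (lines.flatten.toFinset.filter (fun x => x ∉ vs)) \ d.toFinset := by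
    ext x
    simp only [Finset.mem_filter, Finset.mem_sdiff, List.mem_append, List.mem_toFinset]
    tauto
  rw [hset, Finset.card_sdiff, Finset.inter_eq_left.mpr hsub, List.toFinset_card_of_nodup hN]
  have := Finset.card_le_card hsub
  rw [List.toFinset_card_of_nodup hN] at this
  omega

theorem capL_lt (lines : List (List Int)) (visited nf : List Int) (m0 : Int)
    (hm : m0 ∈ nf) (h0 : 0 ≤ m0) (h1 : m0.toNat < lines.length) (hnv : m0 ∉ visited) :
    pvCapL lines (visited ++ nf) < pvCapL lines visited := by
  unfold pvCapL
  apply Finset.card_lt_card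
  constructor
  · intro i hi
    rw [Finset.mem_filter] at hi ⊢
    exact ⟨hi.1, fun h => hi.2 (List.mem_append.2 (Or.inl h))⟩
  · intro hsup
    have h : m0.toNat ∈ (Finset.range lines.length).filter (fun (i : Nat) => ((i : Int) ∉ visited)) := by
      rw [Finset.mem_filter, Finset.mem_range]
      exact ⟨h1, by rwa [Int.toNat_of_nonneg h0]⟩
    have := hsup h
    rw [Finset.mem_filter] at this
    exact this.2 (by rw [Int.toNat_of_nonneg h0]; exact List.mem_append.2 (Or.inr hm))

theorem getLine_flatten (lines : List (List Int)) (j x : Int) (h0 : 0 ≤ j)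
    (h1 : j.toNat < lines.length) (hx : x ∈ pvGetLine lines j) : x ∈ lines.flatten := by
  rw [List.mem_flatten]
  refine ⟨lines[j.toNat], List.getElem_mem h1, ?_⟩
  rwa [← pvGetLine_eq lines j.toNat h1, Int.toNat_of_nonneg h0]

theorem sim (lines : List (List Int)) (dest : Int) : ∀ (fB : Nat) (k : Int)
    (news vs vl frontier visited : List Int) (fA : Nat),
    (∀ x, x ∈ vs ↔ pvStS lines vl x) →
    (∀ j, j ∈ vl ↔ j ∈ visited) →
    (∀ j s, s ∈ vs → s ∉ news → pvThru lines s j → j ∈ vl) →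
    (dest ∈ vs → dest ∈ news) →
    (∀ s ∈ news, ∃ m ∈ frontier, s ∈ pvGetLine lines m) →
    (∀ m ∈ frontier, m ∈ visited) →
    (∀ j ∈ vl, 0 ≤ j ∧ j.toNat < lines.length) →
    news.length + pvCapS lines vs < fA →
    pvCapL lines visited + 2 ≤ fB →
    pvLoopA lines dest (pvBuildGraph lines) fA (news.map (fun s => (s, k))) vs vl
      = pvLoopB lines dest fB frontier visited k := by
  intro fB
  induction fB with
  | zero =>
    intro k news vs vl frontier visited fA _ _ _ _ _ _ _ _ FB
    exact absurd FB (by omega)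
  | succ fB ih =>
    intro k news vs vl frontier visited fA I2 I3 I4 I5 I7 I8 I9 FA FB
    by_cases hfr : frontier = []
    · subst hfr
      have hnews : news = [] := by
        cases news with
        | nil => rfl
        | cons s r =>
          obtain ⟨m, hm, _⟩ := I7 s List.mem_cons_self
          exact absurd hm (List.not_mem_nil)
      subst hnews
      simp [pvLoopA, pvLoopB]
    · by_cases hdest : (frontier.any (fun i => decide (dest ∈ pvGetLine lines i))) = true
      · have hB : pvLoopB lines dest (fB + 1) frontier visited k = k := by
          simp only [pvLoopB, hfr, if_false, hdest, if_true]
        rw [hB]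
        simp only [List.any_eq_true, decide_eq_true_eq] at hdest
        obtain ⟨m, hm, hdm⟩ := hdest
        have hdvs : dest ∈ vs := (I2 dest).2 ⟨m, (I3 m).2 (I8 m hm), hdm⟩
        have hdn : dest ∈ news := I5 hdvs
        have := destRun lines dest (pvBuildGraph lines) k news [] vs vl fA hdn (by omega)
        simpa using this
      · have hdn : dest ∉ news := by
          intro h
          obtain ⟨m, hm, hsm⟩ := I7 dest h
          exact hdest (by simp only [List.any_eq_true, decide_eq_true_eq]; exact ⟨m, hm, hsm⟩)
        obtain ⟨d, vl', heq, hnd, hnv, hiff, horig, hcov⟩ :=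
          levelStep lines dest (pvBuildGraph lines) k news [] vs vl fA hdn
            (fun x => (I2 x).2) (by omega)
        have hB : pvLoopB lines dest (fB + 1) frontier visited k
            = pvLoopB lines dest fB (pvNewFrontier lines frontier visited)
                (visited ++ pvNewFrontier lines frontier visited) (k + 1) := by
          simp [pvLoopB, hfr, hdest]
        set nf := pvNewFrontier lines frontier visited with hnf
        have hfe : ∀ j, j ∈ nf ↔ (j ∉ vl ∧ ∃ s ∈ news, pvThru lines s j) := by
          intro j
          rw [hnf, mem_newFrontier]
          constructor
          · rintro ⟨h0, h1, hjv, m, hm, s, hsm, hsj⟩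
            have hmvl : m ∈ vl := (I3 m).2 (I8 m hm)
            have hsvs : s ∈ vs := (I2 s).2 ⟨m, hmvl, hsm⟩
            have hthru : pvThru lines s j := ⟨h0, h1, hsj⟩
            have hjnvl : j ∉ vl := fun h => hjv ((I3 j).1 h)
            by_cases hsn : s ∈ news
            · exact ⟨hjnvl, s, hsn, hthru⟩
            · exact absurd (I4 j s hsvs hsn hthru) hjnvl
          · rintro ⟨hjv, s, hsn, hthru⟩
            obtain ⟨m, hm, hsm⟩ := I7 s hsn
            exact ⟨hthru.1, hthru.2.1, fun h => hjv ((I3 j).2 h), m, hm, s, hsm, hthru.2.2⟩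
        have heq' : pvLoopA lines dest (pvBuildGraph lines) fA (news.map (fun s => (s, k))) vs vl
            = pvLoopA lines dest (pvBuildGraph lines) (fA - news.length)
                (d.map (fun s => (s, k + 1))) (vs ++ d) vl' := by
          simpa using heq
        rw [heq', hB]
        by_cases hnfe : nf = []
        · have hdnil : d = [] := by
            cases d with
            | nil => rfl
            | cons x xs =>
              obtain ⟨j, ⟨hjv, s, hsn, hj⟩, _⟩ := horig x List.mem_cons_self
              have : j ∈ nf := (hfe j).2 ⟨hjv, s, hsn, (mem_buildGraph lines s j).1 hj⟩
              rw [hnfe] at this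
              exact absurd this (List.not_mem_nil)
          subst hdnil
          obtain ⟨fB', rfl⟩ : ∃ fB', fB = fB' + 1 := ⟨fB - 1, by omega⟩
          rw [hnfe]
          simp [pvLoopA, pvLoopB]
        · -- new-frontier round: re-establish the invariants and recurse
          have hgood : ∀ j ∈ vl', 0 ≤ j ∧ j.toNat < lines.length := by
            intro j hj
            rcases (hiff j).1 hj with hj | ⟨s, _, hj⟩
            · exact I9 j hj
            · have := (mem_buildGraph lines s j).1 hj
              exact ⟨this.1, this.2.1⟩
          have hdfl : ∀ x ∈ d, x ∈ lines.flatten := by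
            intro x hx
            obtain ⟨j, ⟨_, s, _, hj⟩, hxj⟩ := horig x hx
            have ht := (mem_buildGraph lines s j).1 hj
            exact getLine_flatten lines j x ht.1 ht.2.1 hxj
          have hcap := capS_append lines vs d hnd hnv hdfl
          apply ih (k + 1) d (vs ++ d) vl' nf (visited ++ nf) (fA - news.length)
          · intro x
            constructor
            · intro hx
              rcases List.mem_append.1 hx with hx | hx
              · obtain ⟨j, hj, hxj⟩ := (I2 x).1 hx
                exact ⟨j, (hiff j).2 (Or.inl hj), hxj⟩
              · obtain ⟨j, ⟨hjv, s, hsn, hj⟩, hxj⟩ := horig x hx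
                exact ⟨j, (hiff j).2 (Or.inr ⟨s, hsn, hj⟩), hxj⟩
            · exact hcov x
          · intro j
            rw [hiff j, List.mem_append]
            constructor
            · rintro (hj | ⟨s, hsn, hj⟩)
              · exact Or.inl ((I3 j).1 hj)
              · by_cases hv : j ∈ vl
                · exact Or.inl ((I3 j).1 hv)
                · exact Or.inr ((hfe j).2 ⟨hv, s, hsn, (mem_buildGraph lines s j).1 hj⟩)
            · rintro (hj | hj)
              · exact Or.inl ((I3 j).2 hj)
              · obtain ⟨hjv, s, hsn, ht⟩ := (hfe j).1 hj
                exact Or.inr ⟨s, hsn, (mem_buildGraph lines s j).2 ht⟩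
          · intro j s hs hsn ht
            rcases List.mem_append.1 hs with hs | hs
            · by_cases h2 : s ∈ news
              · exact (hiff j).2 (Or.inr ⟨s, h2, (mem_buildGraph lines s j).2 ht⟩)
              · exact (hiff j).2 (Or.inl (I4 j s hs h2 ht))
            · exact absurd hs hsn
          · intro h
            rcases List.mem_append.1 h with h | h
            · exact absurd (I5 h) hdn
            · exact h
          · intro x hx
            obtain ⟨j, ⟨hjv, s, hsn, hj⟩, hxj⟩ := horig x hx
            exact ⟨j, (hfe j).2 ⟨hjv, s, hsn, (mem_buildGraph lines s j).1 hj⟩, hxj⟩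
          · exact fun m hm => List.mem_append.2 (Or.inr hm)
          · exact hgood
          · omega
          · obtain ⟨m0, hm0⟩ := List.exists_mem_of_ne_nil nf hnfe
            rw [hnf] at hm0
            obtain ⟨h0, h1, hm0v, _⟩ := (mem_newFrontier lines frontier visited m0).1 hm0
            have := capL_lt lines visited nf m0 (by rw [hnf]; exact hm0) h0 h1 hm0v
            omega

theorem main_eq (lines : List (List Int)) (src dest : Int) :
    get_metro_num_to_dest lines src dest = get_metro_num_to_dest_alt lines src dest := by
  unfold get_metro_num_to_dest get_metro_num_to_dest_alt
  by_cases h : src = dest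
  · simp [h]
  · simp only [h, if_false]
    obtain ⟨d0, vl0, heq, hnd0, hnv0, hiff0, horig0, hcov0⟩ :=
      lnFold_char lines 0 ((pvBuildGraph lines).getD src []) [] [] []
        (fun x hx => by obtain ⟨j, hj, _⟩ := hx; exact absurd hj (List.not_mem_nil))
    have hf : 2 + (lines.map List.length).sum = (1 + (lines.map List.length).sum) + 1 := by omega
    have hA : pvLoopA lines dest (pvBuildGraph lines)
          (2 + (lines.map List.length).sum) [(src, 0)] [] []
        = pvLoopA lines dest (pvBuildGraph lines) (1 + (lines.map List.length).sum)
            (d0.map (fun s => (s, 1))) d0 vl0 := by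
      rw [hf]
      simp only [pvLoopA, h, if_false, heq]
      norm_num
    rw [hA]
    have hthru0 : ∀ j ∈ vl0, pvThru lines src j := by
      intro j hj
      rcases (hiff0 j).1 hj with hj | hj
      · exact absurd hj (List.not_mem_nil)
      · exact (mem_buildGraph lines src j).1 hj
    have hdfl : ∀ x ∈ d0, x ∈ lines.flatten := by
      intro x hx
      obtain ⟨ℓ, hl, _, hxl⟩ := horig0 x hx
      have ht := (mem_buildGraph lines src ℓ).1 hl
      exact getLine_flatten lines ℓ x ht.1 ht.2.1 hxl
    have hcap := capS_append lines [] d0 hnd0 (by simp) hdfl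
    have hcap0 : pvCapS lines [] ≤ (lines.map List.length).sum := by
      unfold pvCapS
      calc (lines.flatten.toFinset.filter (fun x => x ∉ ([] : List Int))).card
          ≤ lines.flatten.toFinset.card := Finset.card_filter_le _ _
        _ ≤ lines.flatten.length := lines.flatten.toFinset_card_le
        _ = (lines.map List.length).sum := List.length_flatten
    apply sim lines dest (lines.length + 2) 1 d0 d0 vl0
      (pvLinesWithStation lines src) (pvLinesWithStation lines src)
    · intro x
      constructor
      · intro hx
        obtain ⟨ℓ, hl, _, hxl⟩ := horig0 x hx
        exact ⟨ℓ, (hiff0 ℓ).2 (Or.inr hl), hxl⟩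
      · intro hx
        have := hcov0 x hx
        simpa using this
    · intro j
      rw [mem_linesWithStation, hiff0 j]
      simp only [List.not_mem_nil, false_or]
      exact mem_buildGraph lines src j
    · exact fun j s hs hsn _ => absurd hs hsn
    · exact id
    · intro s hs
      obtain ⟨ℓ, hl, _, hxl⟩ := horig0 s hs
      exact ⟨ℓ, (mem_linesWithStation lines src ℓ).2 ((mem_buildGraph lines src ℓ).1 hl), hxl⟩
    · exact fun m hm => hm
    · intro j hj
      have := hthru0 j hj
      exact ⟨this.1, this.2.1⟩
    · simp only [List.nil_append] at hcap
      omega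
    · have : pvCapL lines (pvLinesWithStation lines src) ≤ lines.length := by
        unfold pvCapL
        calc ((Finset.range lines.length).filter _).card
            ≤ (Finset.range lines.length).card := Finset.card_filter_le _ _
          _ = lines.length := Finset.card_range _
      omega

-- ===== VERDICT (by name: the statement is the Claim_ definition above) =====
theorem get_metro_num_to_dest_spec : Claim_equal_get_metro_num_to_dest := by
  intro lines src dest _
  unfold Spec_get_metro_num_to_dest
  exact main_eq lines src dest
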